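-- pv_equiv track=rewrite | github.com/X3NNY/sstilabs | flasklab/level/level.py | level12
-- ===== SOURCE A (Python) =====
-- def level12(code):
--     def waf(s):
--         bl = ['_', '.', '0', '1', '2', '3', '4', '5', '6', '7', '8', '9', '\\', '\'', '"', '[', ']']
--         for i in bl:
--             if i in s:
--                 return "WAF"
--         return s
--     return waf(code)
-- ===== SOURCE B (Python) =====
-- def level12(code):
--     BLACKLIST = frozenset("_.0123456789\\'\"[]")
--     return "WAF" if any(c in BLACKLIST for c in code) else code
-- ===== Notes on version B (the rewrite author's own statement) =====
-- stated objective: idiomatic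
-- what changed: A loops over the 17 blacklist entries doing a substring search of the input for each; B makes one pass over the input string, testing each character against a frozenset of blacklisted characters and short-circuiting on the first hit.
import Mathlib
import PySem

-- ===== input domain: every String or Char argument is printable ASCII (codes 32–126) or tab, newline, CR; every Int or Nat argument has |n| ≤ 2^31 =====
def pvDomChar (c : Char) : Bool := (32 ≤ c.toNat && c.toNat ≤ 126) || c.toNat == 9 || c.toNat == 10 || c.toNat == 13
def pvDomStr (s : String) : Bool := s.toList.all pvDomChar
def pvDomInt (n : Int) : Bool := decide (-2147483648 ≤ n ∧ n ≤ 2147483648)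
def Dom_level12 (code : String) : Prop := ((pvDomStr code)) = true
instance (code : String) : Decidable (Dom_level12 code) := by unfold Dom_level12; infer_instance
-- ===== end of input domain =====

-- B replaces A's loop over blacklist entries (substring search each) with one pass over the input testing chars against a set.

-- ===== PORT A =====
-- inner helper waf: scan the blacklist, substring-test each entry against s
def level12WafLoop (bl : List String) (s : String) : String :=
  match bl with
  | [] => s
  | i :: rest => if PySem.Str.isIn i s then "WAF" else level12WafLoop rest s

def level12 (code : String) : String :=
  level12WafLoop ["_", ".", "0", "1", "2", "3", "4", "5", "6", "7", "8", "9", "\\", "'", "\"", "[", "]"] code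

-- ===== PORT B =====
-- the frozenset of blacklisted characters (built once)
def level12Blacklist : PySem.Set Char :=
  PySem.Set.ofList "_.0123456789\\'\"[]".toList

def level12_alt (code : String) : String :=
  if code.toList.any (fun c => decide (c ∈ level12Blacklist)) then "WAF" else code

-- ===== PRECONDITION & SPEC =====
def Spec_level12 (code : String) (out : String) : Prop := out = level12_alt code
instance (code : String) (out : String) : Decidable (Spec_level12 code out) := by unfold Spec_level12; infer_instance

-- ===== CLAIM (what is proved, stated in full; the proofs are below) =====
def Claim_equal_level12 : Prop := ∀ (code : String), Dom_level12 code → Spec_level12 code (level12 code)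

-- ===== LEMMAS AND PROOFS =====

-- A's single-character substring test is a character-membership test
lemma singleIn (c : Char) (s : String) :
    PySem.Str.isIn (String.ofList [c]) s = s.toList.contains c := by
  rw [Bool.eq_iff_iff]
  simp [PySem.Chars.isIn_iff_infix, List.singleton_infix_iff]

-- A's loop over a blacklist of single-character strings
lemma wafLoop_spec (cs : List Char) (s : String) :
    level12WafLoop (cs.map fun c => String.ofList [c]) s =
      if cs.any (fun c => s.toList.contains c) then "WAF" else s := by
  induction cs with
  | nil => simp [level12WafLoop]
  | cons c rest ih =>
      simp only [List.map_cons, level12WafLoop, singleIn, List.any_cons, ih]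
      by_cases h : c ∈ s.toList <;> simp [h]

-- swapping which collection is scanned does not change "some char of s is blacklisted"
lemma any_swap (cs : List Char) (s : String) :
    cs.any (fun c => s.toList.contains c)
      = s.toList.any (fun c => decide (c ∈ PySem.Set.ofList cs)) := by
  rw [Bool.eq_iff_iff]
  simp only [List.any_eq_true, List.contains_eq_mem, decide_eq_true_eq,
    PySem.Set.mem_ofList]
  tauto

-- ===== VERDICT (by name: the statement is the Claim_ definition above) =====
theorem level12_spec : Claim_equal_level12 := by
  intro code _
  unfold Spec_level12 level12 level12_alt level12Blacklist
  have h : (["_", ".", "0", "1", "2", "3", "4", "5", "6", "7", "8", "9", "\\", "'", "\"", "[", "]"] : List String)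
      = ("_.0123456789\\'\"[]".toList.map fun c => String.ofList [c]) := by decide
  rw [h, wafLoop_spec, any_swap]
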